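-- pv_equiv track=rewrite | github.com/codemario318/Algorithm | python3/boj/greedy/1946_신입_사원.py | solution
-- ===== SOURCE A (Python) =====
-- def solution(ranks):
--     _, prev_rank, *ranks = ranks
--     count = 1
--
--     for rank in ranks:
--         if prev_rank > rank:
--             count += 1
--             prev_rank = rank
--
--     return count
-- ===== SOURCE B (Python) =====
-- def solution(ranks):
--     _, prev_rank, *rest = ranks
--     mins = [prev_rank]
--     for r in rest:
--         mins.append(min(mins[-1], r))
--     return 1 + sum(1 for a, b in zip(mins, mins[1:]) if b < a)
-- ===== Notes on version B (the rewrite author's own statement) =====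
-- stated objective: alternative
-- what changed: B first materialises the prefix-minimum table of the second ranks and then counts strict drops between adjacent table entries in a separate pass, instead of A's single inline running-minimum-with-counter loop.
import Mathlib
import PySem

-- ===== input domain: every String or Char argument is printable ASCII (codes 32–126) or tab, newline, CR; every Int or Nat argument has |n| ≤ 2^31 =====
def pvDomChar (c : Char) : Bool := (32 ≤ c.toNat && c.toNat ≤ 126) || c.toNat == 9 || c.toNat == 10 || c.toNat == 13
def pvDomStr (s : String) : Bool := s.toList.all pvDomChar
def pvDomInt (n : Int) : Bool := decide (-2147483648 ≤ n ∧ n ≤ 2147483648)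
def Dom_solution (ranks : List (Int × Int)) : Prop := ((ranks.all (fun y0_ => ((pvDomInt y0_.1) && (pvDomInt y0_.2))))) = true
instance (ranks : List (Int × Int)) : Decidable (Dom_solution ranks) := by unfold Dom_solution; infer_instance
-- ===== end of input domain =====

-- B replaces A's inline running-minimum counter by a prefix-minimum table followed by a separate strict-drop-counting pass (alternative decomposition, same cost).


-- Python tuple comparison a < b (lexicographic on pairs of ints)
def pyLt (a b : Int × Int) : Bool := decide (a.1 < b.1 ∨ (a.1 = b.1 ∧ a.2 < b.2))
-- Python tuple comparison a > b
def pyGt (a b : Int × Int) : Bool := decide (b.1 < a.1 ∨ (b.1 = a.1 ∧ b.2 < a.2))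

-- ===== PORT A =====
-- A: unpack first two elements, then one loop keeping (prev_rank, count).
def solution (ranks : List (Int × Int)) : Int :=
  match ranks with
  | _ :: prev :: rest =>
      (rest.foldl (fun s r => if pyGt s.1 r then (r, s.2 + 1) else s) (prev, (1 : Int))).2
  | _ => 0   -- unreachable under Pre_solution (Python raises ValueError)

-- ===== PORT B =====
-- Python min(a, b): returns b iff b < a (first argument on ties)
def pyMin (a b : Int × Int) : Int × Int := if pyLt b a then b else a

-- the prefix-minimum table mins (loop appending min(mins[-1], r))
def minsList (prev : Int × Int) : List (Int × Int) → List (Int × Int)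
  | [] => [prev]
  | r :: rs => prev :: minsList (pyMin prev r) rs

-- 1 + sum over zip(mins, mins[1:]) of strict drops
def countDrops : List (Int × Int) → Int
  | [] => 0
  | a :: rest =>
      (match rest.head? with
       | some b => if pyLt b a then 1 else 0
       | none => 0) + countDrops rest

def solution_alt (ranks : List (Int × Int)) : Int :=
  match ranks.drop 1 with   -- `_, prev_rank, *rest = ranks` (first element discarded)
  | prev :: rest => 1 + countDrops (minsList prev rest)
  | [] => 0                 -- unreachable under Pre_solution (Python raises ValueError)

-- ===== PRECONDITION & SPEC =====
-- Python A raises ValueError (not enough values to unpack) when the list has fewer than 2 elements.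
def Pre_solution (ranks : List (Int × Int)) : Prop := 2 ≤ ranks.length
instance (ranks : List (Int × Int)) : Decidable (Pre_solution ranks) := by unfold Pre_solution; infer_instance
def pvWitness_solution : (List (Int × Int)) := [(1, 2), (3, 1)]

def Spec_solution (ranks : List (Int × Int)) (out : Int) : Prop := out = solution_alt ranks
instance (ranks : List (Int × Int)) (out : Int) : Decidable (Spec_solution ranks out) := by unfold Spec_solution; infer_instance

-- ===== CLAIM (what is proved, stated in full; the proofs are below) =====
def Claim_equal_solution : Prop := ∀ (ranks : List (Int × Int)), Dom_solution ranks → Pre_solution ranks → Spec_solution ranks (solution ranks)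

-- ===== LEMMAS AND PROOFS =====
theorem pyLt_irrefl (a : Int × Int) : pyLt a a = false := by
  simp [pyLt]

theorem countDrops_cons (x m : Int × Int) (rs : List (Int × Int)) :
    countDrops (x :: minsList m rs) = (if pyLt m x then 1 else 0) + countDrops (minsList m rs) := by
  cases rs <;> simp [minsList, countDrops]

theorem foldl_eq_countDrops (rest : List (Int × Int)) (prev : Int × Int) (c : Int) :
    (rest.foldl (fun s r => if pyGt s.1 r then (r, s.2 + 1) else s) (prev, c)).2
      = c + countDrops (minsList prev rest) := by
  induction rest generalizing prev c with
  | nil => simp [minsList, countDrops]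
  | cons r rs ih =>
    have hgl : pyGt prev r = pyLt r prev := by
      simp [pyGt, pyLt]
    simp only [List.foldl_cons, minsList, countDrops_cons, pyMin, hgl]
    by_cases h : pyLt r prev = true
    · simp [h, ih]
      omega
    · simp only [Bool.not_eq_true] at h
      simp [h, ih, pyLt_irrefl]

-- ===== VERDICT (by name: the statement is the Claim_ definition above) =====
theorem solution_spec : Claim_equal_solution := by
  intro ranks _ hpre
  match ranks with
  | _ :: prev :: rest =>
    show Spec_solution _ _
    unfold Spec_solution solution solution_alt
    simp only [List.drop_one, List.tail_cons, foldl_eq_countDrops]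
  | [] => exact absurd hpre (by simp [Pre_solution])
  | [_] => exact absurd hpre (by simp [Pre_solution])
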